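-- pv_equiv track=rewrite | github.com/prucinski/CS1527 | Practical10/Practical10/Practical10.py | redspins
-- ===== SOURCE A (Python) =====
-- def redspins(spins):
--     redOccurence = 0
--     for play in spins:
--         if play[0] == 'red':
--             redOccurence +=1
--         else:
--             yield redOccurence
--             redOccurence=0
-- ===== SOURCE B (Python) =====
-- def redspins(spins):
--     # Two-pass decomposition: build the prefix list of consecutive-red run
--     # lengths, then emit the run length recorded just before each non-red spin.
--     run = [0]
--     for play in spins:
--         run.append(run[-1] + 1 if play[0] == 'red' else 0)
--     for before, play in zip(run, spins):
--         if play[0] != 'red':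
--             yield before
-- ===== Notes on version B (the rewrite author's own statement) =====
-- stated objective: alternative
-- what changed: Replaces A's single-pass counter generator by a two-pass decomposition: first build a prefix array of consecutive-red run lengths, then zip it with the spins and emit the recorded run length at each non-red spin.
import Mathlib
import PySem

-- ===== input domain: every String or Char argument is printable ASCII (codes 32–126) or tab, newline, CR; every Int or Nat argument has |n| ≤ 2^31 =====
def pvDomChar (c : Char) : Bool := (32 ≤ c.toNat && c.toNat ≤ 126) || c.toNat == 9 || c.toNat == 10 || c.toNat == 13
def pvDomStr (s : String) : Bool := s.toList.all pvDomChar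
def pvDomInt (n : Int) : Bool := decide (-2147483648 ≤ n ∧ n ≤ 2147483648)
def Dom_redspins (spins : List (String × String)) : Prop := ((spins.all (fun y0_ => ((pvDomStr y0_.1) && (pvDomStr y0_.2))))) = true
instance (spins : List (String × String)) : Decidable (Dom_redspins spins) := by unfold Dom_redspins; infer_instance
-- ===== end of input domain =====

-- B replaces A's single-pass counter generator by a two-pass decomposition
-- (prefix list of red-run lengths, then zip+filter); alternative, same cost.


-- ===== PORT A =====
-- state = (redOccurence, yielded-so-far); the generator's yields collected in order
def redspins (spins : List (String × String)) : List Int :=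
  (spins.foldl
    (fun (st : Int × List Int) play =>
      if play.1 == "red" then (st.1 + 1, st.2) else (0, st.2 ++ [st.1]))
    (0, [])).2

-- ===== PORT B =====
-- run[-1] ported as getLastD 0 (run is never empty); zip truncates like Python's zip
def redspins_alt (spins : List (String × String)) : List Int :=
  let run : List Int :=
    spins.foldl
      (fun r play => r ++ [if play.1 == "red" then r.getLastD 0 + 1 else 0])
      [0]
  ((run.zip spins).filter (fun p => p.2.1 != "red")).map (·.1)

-- ===== PRECONDITION & SPEC =====
def Spec_redspins (spins : List (String × String)) (out : List Int) : Prop := out = redspins_alt spins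
instance (spins : List (String × String)) (out : List Int) : Decidable (Spec_redspins spins out) := by unfold Spec_redspins; infer_instance

-- ===== CLAIM (what is proved, stated in full; the proofs are below) =====
def Claim_equal_redspins : Prop := ∀ (spins : List (String × String)), Dom_redspins spins → Spec_redspins spins (redspins spins)

-- ===== LEMMAS AND PROOFS =====

-- the common recursive characterisation: output from red-count c
def emitFrom (c : Int) : List (String × String) → List Int
  | [] => []
  | p :: t => if p.1 == "red" then emitFrom (c + 1) t else c :: emitFrom 0 t

-- prefix of run lengths continuing from count c
def runFrom (c : Int) : List (String × String) → List Int
  | [] => []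
  | p :: t =>
      let c' := if p.1 == "red" then c + 1 else 0
      c' :: runFrom c' t

theorem redspinsA_foldl (spins : List (String × String)) :
    ∀ (c : Int) (out : List Int),
    (spins.foldl
      (fun (st : Int × List Int) play =>
        if play.1 == "red" then (st.1 + 1, st.2) else (0, st.2 ++ [st.1]))
      (c, out)).2 = out ++ emitFrom c spins := by
  induction spins with
  | nil => intro c out; simp [emitFrom]
  | cons p t ih =>
      intro c out
      simp only [List.foldl]
      by_cases h : p.1 == "red"
      · rw [if_pos h, ih]; simp only [emitFrom]; simp [h]
      · rw [if_neg h, ih]; simp only [emitFrom]; simp [h]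

theorem redspinsB_foldl (spins : List (String × String)) :
    ∀ (r : List Int), r ≠ [] →
    spins.foldl
      (fun r play => r ++ [if play.1 == "red" then r.getLastD 0 + 1 else 0]) r
    = r ++ runFrom (r.getLastD 0) spins := by
  induction spins with
  | nil => intro r _; simp [runFrom]
  | cons p t ih =>
      intro r hr
      have hlast : (r ++ [if p.1 == "red" then r.getLastD 0 + 1 else 0]).getLastD 0
          = if p.1 == "red" then r.getLastD 0 + 1 else 0 := by
        simp
      simp only [List.foldl]
      rw [ih _ (by simp), hlast]
      by_cases h : p.1 == "red" <;> simp [h, runFrom]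

theorem zip_filter_eq_emit (spins : List (String × String)) :
    ∀ (c : Int),
    (((c :: runFrom c spins).zip spins).filter (fun p => p.2.1 != "red")).map (·.1)
      = emitFrom c spins := by
  induction spins with
  | nil => intro c; simp [emitFrom]
  | cons p t ih =>
      intro c
      by_cases h : p.1 = "red"
      · simp only [runFrom, emitFrom, List.zip_cons_cons, List.filter_cons, h]
        simp
        simpa [List.zip] using ih (c + 1)
      · simp only [runFrom, emitFrom, List.zip_cons_cons, List.filter_cons]
        simp [h]
        simpa [List.zip] using ih 0

-- ===== VERDICT (by name: the statement is the Claim_ definition above) =====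
theorem redspins_spec : Claim_equal_redspins := by
  intro spins _
  unfold Spec_redspins redspins redspins_alt
  rw [redspinsA_foldl spins 0 []]
  rw [redspinsB_foldl spins [0] (by simp)]
  simpa using (zip_filter_eq_emit spins 0).symm
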